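-- pv_equiv track=rewrite | github.com/Gitgo012/sample100 | AI Lab codes/lab-3.py | bfs
-- ===== SOURCE A (Python) =====
-- from collections import deque
--
-- def valid_transitions(state):
--     farmer, goat, wolf, cabbage = state
--     if farmer != goat and wolf == goat:
--         return False
--     if farmer != goat and goat == cabbage:
--         return False
--     return True
--
-- def get_neighbours(state):
--     farmer, goat, wolf, cabbage = state
--     possible_transitions = []
--
--     moves = [
--         (1 - farmer, goat, wolf, cabbage),
--         (1 - farmer, 1 - goat, wolf, cabbage) if farmer == goat else None,
--         (1 - farmer, goat, wolf, 1 - cabbage) if farmer == cabbage else None,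
--         (1 - farmer, goat, 1 - wolf, cabbage) if farmer == wolf else None
--     ]
--
--     for move in moves:
--         if move and valid_transitions(move):
--             possible_transitions.append(move)
--
--     return possible_transitions
--
-- def bfs(initial, goal):
--     queue = deque([(initial, [])])
--     visited_node = set([initial])
--     while queue:
--         current_state, path = queue.popleft()
--         if current_state == goal:
--             return path + [current_state]
--
--         for next_state in get_neighbours(current_state):
--             if next_state not in visited_node:
--                 visited_node.add(next_state)
--                 queue.append((next_state, path + [current_state]))
--
--     return None
-- ===== SOURCE B (Python) =====
-- def valid_transitions(state):
--     farmer, goat, wolf, cabbage = state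
--     if farmer != goat and wolf == goat:
--         return False
--     if farmer != goat and goat == cabbage:
--         return False
--     return True
--
-- def get_neighbours(state):
--     farmer, goat, wolf, cabbage = state
--     possible_transitions = []
--     moves = [
--         (1 - farmer, goat, wolf, cabbage),
--         (1 - farmer, 1 - goat, wolf, cabbage) if farmer == goat else None,
--         (1 - farmer, goat, wolf, 1 - cabbage) if farmer == cabbage else None,
--         (1 - farmer, goat, 1 - wolf, cabbage) if farmer == wolf else None
--     ]
--     for move in moves:
--         if move and valid_transitions(move):
--             possible_transitions.append(move)
--     return possible_transitions
--
-- def bfs(initial, goal):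
--     # parent-pointer BFS: queue is a list scanned by index, the parent dict
--     # doubles as the visited set; the path is rebuilt only once, at the goal.
--     parent = {initial: None}
--     order = [initial]
--     i = 0
--     while i < len(order):
--         current_state = order[i]
--         i += 1
--         if current_state == goal:
--             path = []
--             cur = current_state
--             while cur is not None:
--                 path.append(cur)
--                 cur = parent[cur]
--             return path[::-1]
--         for next_state in get_neighbours(current_state):
--             if next_state not in parent:
--                 parent[next_state] = current_state
--                 order.append(next_state)
--     return None
-- ===== Notes on version B (the rewrite author's own statement) =====
-- stated objective: alternative
-- what changed: B replaces A's queue of (state, accumulated-path) pairs and separate visited set with an index-scanned list plus a parent-pointer dict that doubles as the visited set, rebuilding the path once by following parent pointers from the goal and reversing.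
import Mathlib
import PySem

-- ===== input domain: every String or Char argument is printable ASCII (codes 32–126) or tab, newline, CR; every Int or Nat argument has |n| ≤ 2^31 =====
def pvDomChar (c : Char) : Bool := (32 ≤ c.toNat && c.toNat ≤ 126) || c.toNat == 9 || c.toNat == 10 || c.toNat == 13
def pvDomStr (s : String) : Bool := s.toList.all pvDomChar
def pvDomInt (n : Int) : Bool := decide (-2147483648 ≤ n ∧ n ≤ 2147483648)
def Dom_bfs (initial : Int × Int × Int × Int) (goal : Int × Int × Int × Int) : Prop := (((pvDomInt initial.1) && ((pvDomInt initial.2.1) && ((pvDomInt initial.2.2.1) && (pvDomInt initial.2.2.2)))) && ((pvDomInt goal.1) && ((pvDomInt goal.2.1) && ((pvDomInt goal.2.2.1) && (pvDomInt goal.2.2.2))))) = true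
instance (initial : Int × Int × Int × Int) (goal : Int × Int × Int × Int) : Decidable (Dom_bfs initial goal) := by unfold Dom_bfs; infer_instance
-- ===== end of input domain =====

-- B rebuilds the path from a parent-pointer dict (which doubles as the visited set)
-- over an index-scanned queue, instead of carrying a path list in every queue entry; same result.
abbrev PvSt : Type := Int × Int × Int × Int

-- ===== PORT A =====
def validTransitions (s : PvSt) : Bool :=
  if s.1 != s.2.1 && s.2.2.1 == s.2.1 then false
  else if s.1 != s.2.1 && s.2.1 == s.2.2.2 then false
  else true

def getNeighbours (s : PvSt) : List PvSt :=
  let f := s.1; let g := s.2.1; let w := s.2.2.1; let c := s.2.2.2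
  let moves : List (Option PvSt) :=
    [some (1 - f, g, w, c),
     if f == g then some (1 - f, 1 - g, w, c) else none,
     if f == c then some (1 - f, g, w, 1 - c) else none,
     if f == w then some (1 - f, g, 1 - w, c) else none]
  moves.foldl (fun acc mv =>
    match mv with
    | some m => if validTransitions m then acc ++ [m] else acc
    | none => acc) []

-- A's while loop (fuel is only a totality guard; 100 is never reached: at most 16
-- distinct states are ever enqueued, so the loop runs at most 16 iterations).
def bfsLoopA (goal : PvSt) : Nat → List (PvSt × List PvSt) → PySem.Set PvSt → Option (List PvSt)
  | 0, _, _ => none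
  | _ + 1, [], _ => none
  | n + 1, (cur, path) :: rest, visited =>
    if cur == goal then some (path ++ [cur])
    else
      let st := (getNeighbours cur).foldl
        (fun (st : List (PvSt × List PvSt) × PySem.Set PvSt) nxt =>
          if st.2.contains nxt then st
          else (st.1 ++ [(nxt, path ++ [cur])], PySem.Set.add st.2 nxt))
        (rest, visited)
      bfsLoopA goal n st.1 st.2

def bfs (initial : Int × Int × Int × Int) (goal : Int × Int × Int × Int) : Option (List (Int × Int × Int × Int)) :=
  bfsLoopA goal 100 [(initial, [])] (PySem.Set.ofList [initial])

-- ===== PORT B =====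
-- 'while cur is not None: path.append(cur); cur = parent[cur]'; fuel (parent.size + 1
-- at the call site) is only a totality guard — the parent chain is strictly shorter.
def recChain (parent : PySem.Dict PvSt (Option PvSt)) : Nat → Option PvSt → List PvSt → List PvSt
  | 0, _, acc => acc
  | _ + 1, none, acc => acc
  | n + 1, some c, acc => recChain parent n (parent.getD c none) (acc ++ [c])

-- B's while loop over the index-scanned queue (same fuel remark as for A).
def bfsLoopB (goal : PvSt) : Nat → List PvSt → Int → PySem.Dict PvSt (Option PvSt) → Option (List PvSt)
  | 0, _, _, _ => none
  | n + 1, q, i, parent =>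
    if i < (q.length : Int) then
      match PySem.List.pyGet? q i with
      | none => none  -- unreachable: 0 ≤ i < len(q)
      | some cur =>
        if cur == goal then
          some ((recChain parent (parent.size + 1) (some cur) []).reverse)
        else
          let st := (getNeighbours cur).foldl
            (fun (st : List PvSt × PySem.Dict PvSt (Option PvSt)) nxt =>
              if st.2.contains nxt then st
              else (st.1 ++ [nxt], st.2.insert nxt (some cur)))
            (q, parent)
          bfsLoopB goal n st.1 (i + 1) st.2
    else none

def bfs_alt (initial : Int × Int × Int × Int) (goal : Int × Int × Int × Int) : Option (List (Int × Int × Int × Int)) :=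
  bfsLoopB goal 100 [initial] 0 (PySem.Dict.ofList [(initial, none)])

-- ===== PRECONDITION & SPEC =====
def Spec_bfs (initial : Int × Int × Int × Int) (goal : Int × Int × Int × Int) (out : Option (List (Int × Int × Int × Int))) : Prop := out = bfs_alt initial goal
instance (initial : Int × Int × Int × Int) (goal : Int × Int × Int × Int) (out : Option (List (Int × Int × Int × Int))) : Decidable (Spec_bfs initial goal out) := by unfold Spec_bfs; infer_instance

-- ===== CLAIM (what is proved, stated in full; the proofs are below) =====
def Claim_equal_bfs : Prop := ∀ (initial : Int × Int × Int × Int) (goal : Int × Int × Int × Int), Dom_bfs initial goal → Spec_bfs initial goal (bfs initial goal)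

-- ===== LEMMAS AND PROOFS =====

-- '(s, p) is a valid queue entry for parent table P': s is a key, the path fits in the
-- table, and following parent pointers from s rebuilds (p ++ [s]) reversed.
def PvEntry (P : PySem.Dict PvSt (Option PvSt)) (s : PvSt) (p : List PvSt) : Prop :=
  P.contains s = true ∧ p.length ≤ P.size ∧
    ∀ (m : Nat) (acc : List PvSt), p.length + 1 ≤ m →
      recChain P m (some s) acc = acc ++ (p ++ [s]).reverse

-- every non-sentinel value of the parent table is itself a key
def PvValsKeys (P : PySem.Dict PvSt (Option PvSt)) : Prop :=
  ∀ k v, P.get? k = some (some v) → P.contains v = true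

lemma recChain_insert (P : PySem.Dict PvSt (Option PvSt)) (nxt cur : PvSt)
    (hk : P.contains nxt = false) (hvals : PvValsKeys P) :
    ∀ (m : Nat) (c : Option PvSt) (acc : List PvSt),
      (∀ v, c = some v → P.contains v = true) →
      recChain (P.insert nxt (some cur)) m c acc = recChain P m c acc := by
  intro m
  induction m with
  | zero => intro c acc _; rfl
  | succ n ih =>
    intro c acc hc
    cases c with
    | none => rfl
    | some v =>
      have hv : P.contains v = true := hc v rfl
      have hne : v ≠ nxt := by
        rintro rfl; rw [hv] at hk; cases hk
      simp only [recChain]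
      rw [PySem.Dict.getD_insert_of_ne P (some cur) none hne]
      apply ih
      intro v' hv'
      cases h : P.get? v with
      | none => rw [PySem.Dict.getD_of_get?_eq_none P none h] at hv'; cases hv'
      | some w =>
        rw [PySem.Dict.getD_of_get?_eq_some P none h] at hv'
        subst hv'
        exact hvals v v' h

lemma pvContains_insert_mono (P : PySem.Dict PvSt (Option PvSt)) (a x : PvSt) (b : Option PvSt)
    (h : P.contains x = true) : (P.insert a b).contains x = true := by
  rw [PySem.Dict.contains_insert, h]; simp

lemma pvEntry_insert (P : PySem.Dict PvSt (Option PvSt)) (nxt cur s : PvSt) (p' : List PvSt)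
    (hk : P.contains nxt = false) (hvals : PvValsKeys P) (he : PvEntry P s p') :
    PvEntry (P.insert nxt (some cur)) s p' := by
  obtain ⟨h1, h2, h3⟩ := he
  refine ⟨pvContains_insert_mono P nxt s (some cur) h1, ?_, ?_⟩
  · rw [PySem.Dict.size_insert]; split_ifs <;> omega
  · intro m acc hm
    rw [recChain_insert P nxt cur hk hvals m (some s) acc (by intro v hv; cases hv; exact h1)]
    exact h3 m acc hm

lemma pvValsKeys_insert (P : PySem.Dict PvSt (Option PvSt)) (nxt cur : PvSt)
    (hcur : P.contains cur = true) (hvals : PvValsKeys P) :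
    PvValsKeys (P.insert nxt (some cur)) := by
  intro k v h
  rw [PySem.Dict.get?_insert] at h
  split_ifs at h with hkeq
  · have hv : v = cur := by injection h with h'; injection h' with h''; exact h''.symm
    have := pvContains_insert_mono P nxt cur (some cur) hcur
    rwa [hv]
  · exact pvContains_insert_mono P nxt v (some cur) (hvals k v h)

lemma pvEntry_new (P : PySem.Dict PvSt (Option PvSt)) (nxt cur : PvSt) (p : List PvSt)
    (hk : P.contains nxt = false) (hvals : PvValsKeys P) (he : PvEntry P cur p) :
    PvEntry (P.insert nxt (some cur)) nxt (p ++ [cur]) := by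
  obtain ⟨h1, h2, h3⟩ := he
  refine ⟨?_, ?_, ?_⟩
  · rw [PySem.Dict.contains_insert]; simp
  · rw [PySem.Dict.size_insert, hk]
    simp only [List.length_append, List.length_cons, List.length_nil]
    simp
    omega
  · intro m acc hm
    obtain ⟨m', rfl⟩ : ∃ m', m = m' + 1 := ⟨m - 1, by omega⟩
    simp only [recChain]
    rw [PySem.Dict.getD_insert_self]
    rw [recChain_insert P nxt cur hk hvals m' (some cur) (acc ++ [nxt])
      (by intro v hv; cases hv; exact h1)]
    rw [h3 m' (acc ++ [nxt]) (by simp at hm; omega)]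
    simp

lemma foldAB (cur : PvSt) (p : List PvSt) :
    ∀ (ns : List PvSt) (Q : List (PvSt × List PvSt)) (V : PySem.Set PvSt)
      (q : List PvSt) (k : Nat) (P : PySem.Dict PvSt (Option PvSt)),
      k ≤ q.length → q.drop k = Q.map Prod.fst →
      (∀ x : PvSt, V.contains x = P.contains x) →
      (∀ s p', (s, p') ∈ Q → PvEntry P s p') → PvValsKeys P → PvEntry P cur p →
      (k ≤ (ns.foldl (fun (st : List PvSt × PySem.Dict PvSt (Option PvSt)) nxt =>
              if st.2.contains nxt then st
              else (st.1 ++ [nxt], st.2.insert nxt (some cur))) (q, P)).1.length ∧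
       (ns.foldl (fun (st : List PvSt × PySem.Dict PvSt (Option PvSt)) nxt =>
              if st.2.contains nxt then st
              else (st.1 ++ [nxt], st.2.insert nxt (some cur))) (q, P)).1.drop k =
         (ns.foldl (fun (st : List (PvSt × List PvSt) × PySem.Set PvSt) nxt =>
              if st.2.contains nxt then st
              else (st.1 ++ [(nxt, p ++ [cur])], PySem.Set.add st.2 nxt)) (Q, V)).1.map Prod.fst ∧
       (∀ x : PvSt,
         (ns.foldl (fun (st : List (PvSt × List PvSt) × PySem.Set PvSt) nxt =>
              if st.2.contains nxt then st
              else (st.1 ++ [(nxt, p ++ [cur])], PySem.Set.add st.2 nxt)) (Q, V)).2.contains x =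
         (ns.foldl (fun (st : List PvSt × PySem.Dict PvSt (Option PvSt)) nxt =>
              if st.2.contains nxt then st
              else (st.1 ++ [nxt], st.2.insert nxt (some cur))) (q, P)).2.contains x) ∧
       (∀ s p', (s, p') ∈ (ns.foldl (fun (st : List (PvSt × List PvSt) × PySem.Set PvSt) nxt =>
              if st.2.contains nxt then st
              else (st.1 ++ [(nxt, p ++ [cur])], PySem.Set.add st.2 nxt)) (Q, V)).1 →
         PvEntry (ns.foldl (fun (st : List PvSt × PySem.Dict PvSt (Option PvSt)) nxt =>
              if st.2.contains nxt then st
              else (st.1 ++ [nxt], st.2.insert nxt (some cur))) (q, P)).2 s p') ∧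
       PvValsKeys (ns.foldl (fun (st : List PvSt × PySem.Dict PvSt (Option PvSt)) nxt =>
              if st.2.contains nxt then st
              else (st.1 ++ [nxt], st.2.insert nxt (some cur))) (q, P)).2) := by
  intro ns
  induction ns with
  | nil =>
    intro Q V q k P hk hdrop hcont hent hvals _
    exact ⟨hk, hdrop, hcont, hent, hvals⟩
  | cons nxt ns ih =>
    intro Q V q k P hk hdrop hcont hent hvals hcur
    simp only [List.foldl_cons]
    by_cases hP : P.contains nxt = true
    · have hV : V.contains nxt = true := by rw [hcont]; exact hP
      simp only [hP, hV, if_true]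
      exact ih Q V q k P hk hdrop hcont hent hvals hcur
    · have hP' : P.contains nxt = false := by
        cases h : P.contains nxt
        · rfl
        · exact absurd h hP
      have hV : V.contains nxt = false := by rw [hcont]; exact hP'
      simp only [hP', hV, Bool.false_eq_true, if_false]
      apply ih (Q ++ [(nxt, p ++ [cur])]) (PySem.Set.add V nxt) (q ++ [nxt]) k
        (P.insert nxt (some cur))
      · simp only [List.length_append]; omega
      · rw [List.drop_append_of_le_length hk, hdrop]
        simp
      · intro x
        by_cases hx : x = nxt
        · subst hx
          have l1 : (PySem.Set.add V x).contains x = true :=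
            (PySem.Set.contains_iff _ _).mpr ((PySem.Set.mem_add _ _ _).mpr (Or.inr rfl))
          have l2 : (P.insert x (some cur)).contains x = true := by
            rw [PySem.Dict.contains_insert]; simp
          rw [l1, l2]
        · have l1 : (PySem.Set.add V nxt).contains x = V.contains x := by
            cases hb : V.contains x
            · cases hb2 : (PySem.Set.add V nxt).contains x
              · rfl
              · have := (PySem.Set.mem_add V nxt x).mp ((PySem.Set.contains_iff _ _).mp hb2)
                rcases this with h' | h'
                · rw [(PySem.Set.contains_iff V x).mpr h'] at hb; cases hb
                · exact absurd h' hx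
            · exact (PySem.Set.contains_iff _ _).mpr
                ((PySem.Set.mem_add V nxt x).mpr (Or.inl ((PySem.Set.contains_iff V x).mp hb)))
          have l2 : (P.insert nxt (some cur)).contains x = P.contains x := by
            rw [PySem.Dict.contains_insert]
            simp [hx]
          rw [l1, l2, hcont]
      · intro s p' hmem
        rcases List.mem_append.mp hmem with h' | h'
        · exact pvEntry_insert P nxt cur s p' hP' hvals (hent s p' h')
        · simp only [List.mem_singleton] at h'
          rw [Prod.mk.injEq] at h'
          obtain ⟨rfl, rfl⟩ := h'
          exact pvEntry_new P s cur p hP' hvals hcur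
      · exact pvValsKeys_insert P nxt cur hcur.1 hvals
      · exact pvEntry_insert P nxt cur cur p hP' hvals hcur

lemma loopAB (goal : PvSt) :
    ∀ (n : Nat) (Q : List (PvSt × List PvSt)) (V : PySem.Set PvSt)
      (q : List PvSt) (i : Int) (P : PySem.Dict PvSt (Option PvSt)),
      0 ≤ i → i.toNat ≤ q.length →
      q.drop i.toNat = Q.map Prod.fst →
      (∀ x : PvSt, V.contains x = P.contains x) →
      (∀ s p, (s, p) ∈ Q → PvEntry P s p) → PvValsKeys P →
      bfsLoopA goal n Q V = bfsLoopB goal n q i P := by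
  intro n
  induction n with
  | zero => intro Q V q i P _ _ _ _ _ _; rfl
  | succ n ih =>
    intro Q V q i P h0 hle hdrop hcont hent hvals
    cases Q with
    | nil =>
      have hlen : (q.drop i.toNat).length = 0 := by rw [hdrop]; rfl
      rw [List.length_drop] at hlen
      have hni : ¬ (i < (q.length : Int)) := by omega
      simp [bfsLoopA, bfsLoopB, hni]
    | cons hd rest =>
      obtain ⟨cur, p⟩ := hd
      have hlen : (q.drop i.toNat).length = rest.length + 1 := by
        rw [hdrop]; simp
      rw [List.length_drop] at hlen
      have hlt : i.toNat < q.length := by omega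
      have hi : i < (q.length : Int) := by omega
      have hget : PySem.List.pyGet? q i = some cur := by
        have h1 : (q.drop i.toNat)[0]? = some cur := by rw [hdrop]; rfl
        rw [List.getElem?_drop] at h1
        rw [show i = ((i.toNat : Nat) : Int) by omega, PySem.List.pyGet?_natCast]
        simpa using h1
      have hhead : PvEntry P cur p := hent cur p (by simp)
      simp only [bfsLoopA, bfsLoopB, hget, if_pos hi]
      by_cases hg : cur = goal
      · subst hg
        simp only [BEq.rfl, if_true]
        rw [hhead.2.2 (P.size + 1) [] (by have := hhead.2.1; omega)]
        simp
      · have hbe : (cur == goal) = false := by simp [hg]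
        simp only [hbe, Bool.false_eq_true, if_false]
        have hdrop' : q.drop (i.toNat + 1) = rest.map Prod.fst := by
          have h2 : q.drop (i.toNat + 1) = (q.drop i.toNat).drop 1 := by
            rw [List.drop_drop]
          rw [h2, hdrop]
          rfl
        obtain ⟨f1, f2, f3, f4, f5⟩ := foldAB cur p (getNeighbours cur) rest V q
          (i.toNat + 1) P hlt hdrop' hcont (fun s p' h => hent s p' (by simp [h])) hvals hhead
        have ht : (i + 1).toNat = i.toNat + 1 := by omega
        exact ih _ _ _ (i + 1) _ (by omega) (by rw [ht]; exact f1) (by rw [ht]; exact f2)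
          f3 f4 f5

theorem bfs_spec : Claim_equal_bfs := by
  unfold Claim_equal_bfs
  intro initial goal _
  unfold Spec_bfs bfs bfs_alt
  have hD : PySem.Dict.ofList [(initial, (none : Option PvSt))]
      = PySem.Dict.empty.insert initial none := rfl
  apply loopAB goal 100 [(initial, [])] (PySem.Set.ofList [initial]) [initial] 0
    (PySem.Dict.ofList [(initial, none)])
  · omega
  · simp
  · simp
  · intro x
    rw [hD, PySem.Dict.contains_insert]
    by_cases hx : x = initial <;>
      simp [hx, PySem.Set.ofList, PySem.Set.add, PySem.Set.contains, PySem.Set.empty]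
  · intro s p hmem
    simp only [List.mem_singleton, Prod.mk.injEq] at hmem
    obtain ⟨rfl, rfl⟩ := hmem
    rw [hD]
    refine ⟨by rw [PySem.Dict.contains_insert]; simp, by simp, ?_⟩
    intro m acc hm
    obtain ⟨m', rfl⟩ : ∃ m', m = m' + 1 := ⟨m - 1, by omega⟩
    simp only [recChain]
    rw [PySem.Dict.getD_insert_self]
    cases m' <;> simp [recChain]
  · intro k v h
    rw [hD, PySem.Dict.get?_insert] at h
    split_ifs at h with hkeq
    · injection h with h'; cases h'
    · rw [show (PySem.Dict.empty : PySem.Dict PvSt (Option PvSt)).get? k = none by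
        simp [pysem]] at h
      cases h
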